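-- pv_equiv track=rewrite | github.com/yunjunghun0116/python | cnuAlgorithm/실습7주차/2.py | solve
-- ===== SOURCE A (Python) =====
-- def solve(base,stations):
--     result = 0
--     # 모든 기지에서부터 각 기지와 전력소간 최단거리를 구한후
--     for b in base:
--         distance_min = float('inf')
--         for s in stations:
--             distance_min = min(distance_min,abs(b-s))
--         # 여기서 distance_min이 최단거리이기때문에
--         # 그 최단거리들사이 최댓값을 출력해주면 그 값이 결국 모든 기지가
--         # 전력공급망에 포함하는 최소한의 추가전력생산량이다.
--         result = max(result,distance_min)
--     return result
-- ===== SOURCE B (Python) =====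
-- def solve(base, stations):
--     # sort once, then binary-search the nearest station for each base
--     st = sorted(stations)
--     n = len(st)
--     best = 0
--     for b in base:
--         # CPython's bisect_left loop, written out (no imports in this module)
--         lo, hi = 0, n
--         while lo < hi:
--             mid = (lo + hi) // 2
--             if st[mid] < b:
--                 lo = mid + 1
--             else:
--                 hi = mid
--         if lo == n:
--             d = b - st[n - 1]
--         elif lo == 0:
--             d = st[0] - b
--         else:
--             d = min(b - st[lo - 1], st[lo] - b)
--         if best < d:
--             best = d
--     return best
-- ===== Notes on version B (the rewrite author's own statement) =====
-- stated objective: faster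
-- what changed: Instead of scanning all stations for every base (nested loops), B sorts the stations once and binary-searches each base's insertion point, taking the nearer of the two neighbouring stations.
-- outside the precondition, e.g. on solve([0], []): A returns inf, B raises IndexError
import Mathlib
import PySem

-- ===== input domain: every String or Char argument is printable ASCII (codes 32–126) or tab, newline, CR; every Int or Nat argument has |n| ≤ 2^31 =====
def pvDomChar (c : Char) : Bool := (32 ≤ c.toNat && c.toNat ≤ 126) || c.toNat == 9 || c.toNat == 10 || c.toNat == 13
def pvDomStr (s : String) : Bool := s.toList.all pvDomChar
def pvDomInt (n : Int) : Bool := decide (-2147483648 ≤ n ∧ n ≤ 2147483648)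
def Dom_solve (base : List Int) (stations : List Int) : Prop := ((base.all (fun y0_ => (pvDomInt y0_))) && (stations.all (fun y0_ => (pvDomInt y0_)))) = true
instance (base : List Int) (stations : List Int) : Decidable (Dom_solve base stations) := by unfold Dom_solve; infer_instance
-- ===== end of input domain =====

-- B sorts the stations once and binary-searches the nearest station per base instead of A's nested scan (asymptotically faster).


-- ===== PORT A =====
-- inner loop: distance_min starts at float('inf'); `none` models the still-infinite state
def solveInner (b : Int) (stations : List Int) : Option Int :=
  stations.foldl (fun m s =>
    match m with
    | none => some (|b - s|)
    | some d => some (min d (|b - s|))) none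

def solve (base : List Int) (stations : List Int) : Int :=
  base.foldl (fun result b =>
    match solveInner b stations with
    | none => result   -- Python would carry float('inf') here; excluded by Pre_solve
    | some d => max result d) 0

-- ===== PORT B =====
def solve_alt (base : List Int) (stations : List Int) : Int :=
  let st := PySem.List.sorted stations (fun x => x) false
  let n := st.length
  base.foldl (fun best b =>
    let lo := PySem.List.bisectLeft st b   -- CPython's bisect_left loop, as written out in Source B
    let d := if lo = n then b - st.getD (n - 1) 0
             else if lo = 0 then st.getD 0 0 - b
             else min (b - st.getD (lo - 1) 0) (st.getD lo 0 - b)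
    if best < d then d else best) 0

-- ===== PRECONDITION & SPEC =====
-- Pre_ excludes nonempty base with empty stations: there A returns float('inf'), not an int, and B raises IndexError.
def Pre_solve (base : List Int) (stations : List Int) : Prop := base = [] ∨ stations ≠ []
instance (base : List Int) (stations : List Int) : Decidable (Pre_solve base stations) := by unfold Pre_solve; infer_instance
def pvWitness_solve : List Int × List Int := ([1, 5, -3], [0, 4])

def Spec_solve (base : List Int) (stations : List Int) (out : Int) : Prop := out = solve_alt base stations
instance (base : List Int) (stations : List Int) (out : Int) : Decidable (Spec_solve base stations out) := by unfold Spec_solve; infer_instance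

-- ===== CLAIM (what is proved, stated in full; the proofs are below) =====
def Claim_equal_solve : Prop := ∀ (base : List Int) (stations : List Int), Dom_solve base stations → Pre_solve base stations → Spec_solve base stations (solve base stations)

-- ===== LEMMAS AND PROOFS =====

-- the min-fold of A's inner loop once the accumulator is a value
theorem solveInner_foldl_some (b : Int) (rest : List Int) (d : Int) :
    rest.foldl (fun m s =>
      match m with
      | none => some (|b - s|)
      | some d => some (min d (|b - s|))) (some d)
    = some (rest.foldl (fun m s => min m (|b - s|)) d) := by
  induction rest generalizing d with
  | nil => rfl
  | cons x xs ih => simp [List.foldl, ih]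

-- the min-fold is a lower bound and is attained
theorem minFold_char (b : Int) (rest : List Int) (d : Int) :
    rest.foldl (fun m s => min m (|b - s|)) d ≤ d ∧
    (∀ s ∈ rest, rest.foldl (fun m s => min m (|b - s|)) d ≤ |b - s|) ∧
    (rest.foldl (fun m s => min m (|b - s|)) d = d ∨
      ∃ s ∈ rest, rest.foldl (fun m s => min m (|b - s|)) d = |b - s|) := by
  induction rest generalizing d with
  | nil => simp
  | cons x xs ih =>
    obtain ⟨h1, h2, h3⟩ := ih (min d (|b - x|))
    refine ⟨le_trans h1 (min_le_left _ _), ?_, ?_⟩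
    · intro s hs
      rcases List.mem_cons.mp hs with rfl | hs
      · exact le_trans h1 (min_le_right _ _)
      · exact h2 s hs
    · rw [List.foldl_cons]
      rcases h3 with h3 | ⟨s, hs, hval⟩
      · rcases le_total d (|b - x|) with hc | hc
        · left; rw [h3]; exact min_eq_left hc
        · right; exact ⟨x, by simp, by rw [h3]; exact min_eq_right hc⟩
      · right; exact ⟨s, by simp [hs], hval⟩

-- A's inner loop computes the (attained) minimum distance
theorem solveInner_char (b : Int) (stations : List Int) (hne : stations ≠ []) :
    ∃ m, solveInner b stations = some m ∧
      (∃ s ∈ stations, m = |b - s|) ∧ (∀ s ∈ stations, m ≤ |b - s|) := by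
  obtain ⟨x, xs, rfl⟩ := List.exists_cons_of_ne_nil hne
  refine ⟨xs.foldl (fun m s => min m (|b - s|)) (|b - x|), ?_, ?_, ?_⟩
  · simp [solveInner, List.foldl, solveInner_foldl_some]
  · obtain ⟨_, _, h3⟩ := minFold_char b xs (|b - x|)
    rcases h3 with h3 | ⟨s, hs, hval⟩
    · exact ⟨x, by simp, h3⟩
    · exact ⟨s, by simp [hs], hval⟩
  · obtain ⟨h1, h2, _⟩ := minFold_char b xs (|b - x|)
    intro s hs
    rcases List.mem_cons.mp hs with rfl | hs
    · exact h1
    · exact h2 s hs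

-- B's per-base candidate formula, as a proof-side abbreviation
def candB (b : Int) (st : List Int) : Int :=
  let n := st.length
  let lo := PySem.List.bisectLeft st b
  if lo = n then b - st.getD (n - 1) 0
  else if lo = 0 then st.getD 0 0 - b
  else min (b - st.getD (lo - 1) 0) (st.getD lo 0 - b)

-- B's candidate is the attained minimum distance over a sorted nonempty list
theorem candB_char (b : Int) (st : List Int) (hp : List.Pairwise (fun a c => a ≤ c) st)
    (hn : 0 < st.length) :
    (∃ (k : Nat) (hk : k < st.length), candB b st = |b - st[k]|) ∧
    (∀ (k : Nat) (hk : k < st.length), candB b st ≤ |b - st[k]|) := by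
  obtain ⟨hle, hlt, hge⟩ := PySem.List.bisectLeft_spec st b hp
  have hmono : ∀ (p q : Nat) (hq : q < st.length) (hpq : p ≤ q), st[p]'(by omega) ≤ st[q] := by
    intro p q hq hpq
    rcases Nat.lt_or_ge p q with h | h
    · exact (List.pairwise_iff_getElem.mp hp) p q (by omega) hq h
    · have : p = q := by omega
      subst this; rfl
  have habs1 : ∀ x y : Int, y < x → |x - y| = x - y := fun x y h => abs_of_pos (by omega)
  have habs2 : ∀ x y : Int, x ≤ y → |x - y| = y - x := by
    intro x y h
    rw [abs_of_nonpos (by omega : x - y ≤ 0)]; omega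
  unfold candB
  simp only
  by_cases h1 : PySem.List.bisectLeft st b = st.length
  · rw [if_pos h1]
    have hlast : st.getD (st.length - 1) 0 = st[st.length - 1]'(by omega) :=
      List.getD_eq_getElem st 0 (by omega)
    have hlastlt : st[st.length - 1]'(by omega) < b := hlt _ (by omega) (by omega)
    constructor
    · exact ⟨st.length - 1, by omega, by rw [hlast, habs1 b _ hlastlt]⟩
    · intro k hk
      have hklt : st[k] < b := hlt k hk (by omega)
      rw [hlast, habs1 b _ hklt]
      have := hmono k (st.length - 1) (by omega) (by omega)
      omega
  · rw [if_neg h1]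
    by_cases h2 : PySem.List.bisectLeft st b = 0
    · rw [if_pos h2]
      have h0 : st.getD 0 0 = st[0] := List.getD_eq_getElem st 0 hn
      have h0ge : b ≤ st[0] := hge 0 hn (by omega)
      constructor
      · exact ⟨0, hn, by rw [h0, habs2 b _ h0ge]⟩
      · intro k hk
        have hkge : b ≤ st[k] := hge k hk (by omega)
        rw [h0, habs2 b _ hkge]
        have := hmono 0 k hk (by omega)
        omega
    · rw [if_neg h2]
      set lo := PySem.List.bisectLeft st b with hlo
      have hlo1 : 1 ≤ lo := by omega
      have hlon : lo < st.length := by omega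
      have hgl : st.getD (lo - 1) 0 = st[lo - 1]'(by omega) :=
        List.getD_eq_getElem st 0 (by omega)
      have hgr : st.getD lo 0 = st[lo]'hlon := List.getD_eq_getElem st 0 hlon
      have hllt : st[lo - 1]'(by omega) < b := hlt _ (by omega) (by omega)
      have hrge : b ≤ st[lo]'hlon := hge lo hlon (by omega)
      rw [hgl, hgr]
      constructor
      · rcases le_total (b - st[lo - 1]'(by omega)) (st[lo]'hlon - b) with hc | hc
        · exact ⟨lo - 1, by omega, by rw [min_eq_left hc, habs1 b _ hllt]⟩
        · exact ⟨lo, hlon, by rw [min_eq_right hc, habs2 b _ hrge]⟩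
      · intro k hk
        rcases Nat.lt_or_ge k lo with hkc | hkc
        · have hklt : st[k] < b := hlt k hk hkc
          rw [habs1 b _ hklt]
          have := hmono k (lo - 1) (by omega) (by omega)
          have := min_le_left (b - st[lo - 1]'(by omega)) (st[lo]'hlon - b)
          omega
        · have hkge : b ≤ st[k] := hge k hk hkc
          rw [habs2 b _ hkge]
          have := hmono lo k hk hkc
          have := min_le_right (b - st[lo - 1]'(by omega)) (st[lo]'hlon - b)
          omega

-- A's inner loop equals B's candidate
theorem inner_eq_cand (b : Int) (stations : List Int) (hne : stations ≠ []) :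
    solveInner b stations = some
      (let st := PySem.List.sorted stations (fun x => x) false
       let n := st.length
       let lo := PySem.List.bisectLeft st b
       if lo = n then b - st.getD (n - 1) 0
       else if lo = 0 then st.getD 0 0 - b
       else min (b - st.getD (lo - 1) 0) (st.getD lo 0 - b)) := by
  show solveInner b stations = some (candB b (PySem.List.sorted stations (fun x => x) false))
  have hp := PySem.List.sorted_pairwise stations (fun x => x)
  have hperm := PySem.List.sorted_perm stations (fun x => x) false
  have hn : 0 < (PySem.List.sorted stations (fun x => x) false).length := by
    rw [hperm.length_eq]
    exact List.length_pos_iff.mpr hne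
  obtain ⟨m, hm, ⟨sA, hsA, hvA⟩, hlbA⟩ := solveInner_char b stations hne
  obtain ⟨⟨k, hk, hvB⟩, hlbB⟩ := candB_char b (PySem.List.sorted stations (fun x => x) false) hp hn
  rw [hm]
  congr 1
  have h1 : m ≤ candB b (PySem.List.sorted stations (fun x => x) false) := by
    rw [hvB]
    exact hlbA _ (hperm.mem_iff.mp (List.getElem_mem hk))
  have h2 : candB b (PySem.List.sorted stations (fun x => x) false) ≤ m := by
    obtain ⟨j, hj, hjv⟩ := List.mem_iff_getElem.mp (hperm.mem_iff.mpr hsA)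
    rw [hvA, ← hjv]
    exact hlbB j hj
  omega

-- ===== VERDICT (by name: the statement is the Claim_ definition above) =====
theorem solve_spec : Claim_equal_solve := by
  intro base stations hdom hpre
  clear hdom
  unfold Spec_solve solve solve_alt
  rcases hpre with rfl | hne
  · rfl
  · induction base using List.reverseRecOn with
    | nil => rfl
    | append_singleton xs x ih =>
      rw [List.foldl_append, List.foldl_append, ih]
      simp only [List.foldl]
      rw [inner_eq_cand x stations hne]
      simp only []
      omega
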